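-- pv_equiv track=rewrite | github.com/jarealess/Esp.-Python-Programming | 2. Funcs, Files and Dicts/4thWeek -- AdvancedFunctions/listas_reto.py | beginning
-- ===== SOURCE A (Python) =====
-- def beginning(lst):
--     i = 0
--     sublist=[]
--     while i < len(lst):
--         if lst[i] == 'bye':
--             break
--         else:
--             sublist.append(lst[i])
--             i+=1
--
--     if len(sublist) < 10:
--         ret_lst = sublist
--     else:
--         ret_lst = sublist[:10]
--
--
--     return ret_lst
-- ===== SOURCE B (Python) =====
-- def beginning(lst):
--     window = lst[:10]
--     if 'bye' in window:
--         return window[:window.index('bye')]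
--     return window
-- ===== Notes on version B (the rewrite author's own statement) =====
-- stated objective: faster
-- what changed: A accumulates elements one by one in an index-while loop until 'bye' and then trims the accumulator to 10; B slices the 10-element window first and then cuts it at the first 'bye' inside, so it never scans past the first ten elements.
import Mathlib
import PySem

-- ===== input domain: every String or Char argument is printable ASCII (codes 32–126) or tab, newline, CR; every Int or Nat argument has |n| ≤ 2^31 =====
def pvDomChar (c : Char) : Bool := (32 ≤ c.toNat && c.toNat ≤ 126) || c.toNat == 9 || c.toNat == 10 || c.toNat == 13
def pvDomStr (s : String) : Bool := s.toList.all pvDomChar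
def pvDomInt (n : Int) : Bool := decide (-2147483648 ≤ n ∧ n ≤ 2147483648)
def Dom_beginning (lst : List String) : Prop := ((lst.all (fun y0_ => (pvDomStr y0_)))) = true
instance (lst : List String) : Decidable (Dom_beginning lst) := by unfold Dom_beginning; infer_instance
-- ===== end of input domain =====

-- B replaces A's index-while-loop with an accumulator (then a length test and trim)
-- by slicing the first-10 window once and cutting it at the first 'bye' inside: simpler.

-- ===== PORT A =====
-- the while loop of A: i is the index, sub the accumulated sublist
def beginningLoop (lst : List String) (i : Nat) (sub : List String) : List String :=
  if h : i < lst.length then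
    if lst[i] = "bye" then sub
    else beginningLoop lst (i + 1) (sub ++ [lst[i]])
  else sub
termination_by lst.length - i

def beginning (lst : List String) : List String :=
  let sublist := beginningLoop lst 0 []
  if sublist.length < 10 then sublist else sublist.take 10

-- ===== PORT B =====
def beginning_alt (lst : List String) : List String :=
  let window := lst.take 10
  match PySem.List.index? window "bye" with
  | some k => window.take k
  | none => window

-- ===== PRECONDITION & SPEC =====
def Spec_beginning (lst : List String) (out : List String) : Prop := out = beginning_alt lst
instance (lst : List String) (out : List String) : Decidable (Spec_beginning lst out) := by unfold Spec_beginning; infer_instance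

-- ===== CLAIM (what is proved, stated in full; the proofs are below) =====
def Claim_equal_beginning : Prop := ∀ (lst : List String), Dom_beginning lst → Spec_beginning lst (beginning lst)

-- ===== LEMMAS AND PROOFS =====

-- A's loop appends the takeWhile (· ≠ "bye") of the remaining suffix to the accumulator
theorem beginningLoop_eq (lst : List String) (i : Nat) (sub : List String) :
    beginningLoop lst i sub = sub ++ (lst.drop i).takeWhile (fun s => s ≠ "bye") := by
  fun_induction beginningLoop lst i sub with
  | case1 i sub h hb =>
      rw [List.drop_eq_getElem_cons h, List.takeWhile_cons]
      simp [hb]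
  | case2 i sub h hb ih =>
      rw [ih, List.drop_eq_getElem_cons h, List.takeWhile_cons]
      simp [hb]
  | case3 i sub h =>
      rw [List.drop_eq_nil_of_le (by omega)]
      simp

-- B's trim-then-cut equals A's takeWhile-then-trim, for any window size n
theorem take_takeWhile_eq (n : Nat) (lst : List String) :
    (lst.takeWhile (fun s => s ≠ "bye")).take n =
      (match PySem.List.index? (lst.take n) "bye" with
       | some k => (lst.take n).take k
       | none => lst.take n) := by
  induction lst generalizing n with
  | nil => simp [PySem.List.index?]
  | cons a t ih =>
      cases n with
      | zero => simp [PySem.List.index?, List.idxOf?]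
      | succ m =>
          rw [List.take_succ_cons, List.takeWhile_cons]
          by_cases hb : a = "bye"
          · subst hb
            rw [PySem.List.index?_cons_self]
            simp
          · have hne : a ≠ "bye" := hb
            rw [if_pos (by simp [hne]), List.take_succ_cons,
              PySem.List.index?_cons_of_ne (t.take m) hne]
            have := ih m
            cases hk : PySem.List.index? (t.take m) "bye" with
            | some k =>
                rw [hk] at this
                simp only [Option.map_some]
                simp at this ⊢
                exact this
            | none =>
                rw [hk] at this
                simp only [Option.map_none]
                simp at this ⊢
                exact this

-- ===== VERDICT (by name: the statement is the Claim_ definition above) =====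
theorem beginning_spec : Claim_equal_beginning := by
  intro lst _
  unfold Spec_beginning beginning beginning_alt
  rw [beginningLoop_eq]
  simp only [List.drop_zero, List.nil_append]
  rw [← take_takeWhile_eq]
  split
  · next h => rw [List.take_of_length_le (by omega)]
  · rfl
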